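-- pv_equiv track=rewrite | github.com/BohdanZasymovych/file-compressor | deflate.py | get_length_code
-- ===== SOURCE A (Python) =====
-- LENGTH_CODES = (
--     (257, 3, 3, 0),
--     (258, 4, 4, 0),
--     (259, 5, 5, 0),
--     (260, 6, 6, 0),
--     (261, 7, 7, 0),
--     (262, 8, 8, 0),
--     (263, 9, 9, 0),
--     (264, 10, 10, 0),
--     (265, 11, 12, 1),
--     (266, 13, 14, 1),
--     (267, 15, 16, 1),
--     (268, 17, 18, 1),
--     (269, 19, 22, 2),
--     (270, 23, 26, 2),
--     (271, 27, 30, 2),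
--     (272, 31, 34, 2),
--     (273, 35, 42, 3),
--     (274, 43, 50, 3),
--     (275, 51, 58, 3),
--     (276, 59, 66, 3),
--     (277, 67, 82, 4),
--     (278, 83, 98, 4),
--     (279, 99, 114, 4),
--     (280, 115, 130, 4),
--     (281, 131, 162, 5),
--     (282, 163, 194, 5),
--     (283, 195, 226, 5),
--     (284, 227, 257, 5),
--     (285, 258, 258, 0)
-- )
--
-- def get_length_code(length):
--     """
--     Given a match length (in the range 3 to 258), this function returns a tuple:
--     (length_code, extra_bits_count, extra_bits_value)
--     """
--     if length < 3 or length > 258: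
--         raise ValueError
--
--     for (code, min_len, max_len, extra_bits) in LENGTH_CODES:
--         if min_len <= length <= max_len:
--             extra_value = length - min_len
--             return {'code': code, 'extra_bits': extra_bits, 'extra_value': extra_value}
--     raise ValueError
-- ===== SOURCE B (Python) =====
-- def get_length_code(length):
--     """Closed-form DEFLATE length-code computation (no table scan)."""
--     if length < 3 or length > 258:
--         raise ValueError
--     if length == 258:
--         return {'code': 285, 'extra_bits': 0, 'extra_value': 0}
--     v = length - 3
--     b = max(0, v.bit_length() - 3)
--     base_length = (1 << (b + 2)) + 3
--     base_code = 261 + 4 * b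
--     return {'code': base_code + ((length - base_length) >> b),
--             'extra_bits': b,
--             'extra_value': (length - base_length) & ((1 << b) - 1)}
-- ===== Notes on version B (the rewrite author's own statement) =====
-- stated objective: alternative
-- what changed: Replaces the linear scan of the LENGTH_CODES table with a closed-form bit-arithmetic computation (bit_length gives the extra-bits class, shift/mask give code offset and extra value), special-casing the maximal length.
import Mathlib
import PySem

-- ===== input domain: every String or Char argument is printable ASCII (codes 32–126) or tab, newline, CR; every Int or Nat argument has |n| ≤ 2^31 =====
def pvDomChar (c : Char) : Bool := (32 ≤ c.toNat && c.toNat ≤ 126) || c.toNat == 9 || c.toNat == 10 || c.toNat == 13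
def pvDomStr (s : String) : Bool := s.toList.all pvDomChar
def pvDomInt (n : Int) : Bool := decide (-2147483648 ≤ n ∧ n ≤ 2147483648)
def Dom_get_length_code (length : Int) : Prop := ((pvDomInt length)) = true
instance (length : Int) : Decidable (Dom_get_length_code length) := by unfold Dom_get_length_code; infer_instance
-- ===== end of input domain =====

-- B replaces A's linear scan of the 29-entry LENGTH_CODES table with a closed-form
-- bit-arithmetic computation of the code (objective: alternative/simpler).

-- ===== PORT A =====
def lengthCodesA : List (Int × Int × Int × Int) :=
  [(257, 3, 3, 0), (258, 4, 4, 0), (259, 5, 5, 0), (260, 6, 6, 0),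
   (261, 7, 7, 0), (262, 8, 8, 0), (263, 9, 9, 0), (264, 10, 10, 0),
   (265, 11, 12, 1), (266, 13, 14, 1), (267, 15, 16, 1), (268, 17, 18, 1),
   (269, 19, 22, 2), (270, 23, 26, 2), (271, 27, 30, 2), (272, 31, 34, 2),
   (273, 35, 42, 3), (274, 43, 50, 3), (275, 51, 58, 3), (276, 59, 66, 3),
   (277, 67, 82, 4), (278, 83, 98, 4), (279, 99, 114, 4), (280, 115, 130, 4),
   (281, 131, 162, 5), (282, 163, 194, 5), (283, 195, 226, 5), (284, 227, 257, 5),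
   (285, 258, 258, 0)]

-- the for-loop with early return; the final `raise ValueError` branch is unreachable under Pre_
def glcLoopA (length : Int) : List (Int × Int × Int × Int) → List (String × Int)
  | [] => []
  | (code, min_len, max_len, extra_bits) :: rest =>
    if min_len ≤ length ∧ length ≤ max_len then
      [("code", code), ("extra_bits", extra_bits), ("extra_value", length - min_len)]
    else glcLoopA length rest

def get_length_code (length : Int) : List (String × Int) :=
  if length < 3 ∨ length > 258 then []   -- Python raises ValueError; excluded by Pre_
  else glcLoopA length lengthCodesA

-- ===== PORT B =====
-- Python int.bit_length() on a nonnegative int = Nat.size (exact for v ≥ 0)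
def pyBitLength (v : Int) : Int := (Nat.size v.toNat : Int)

def get_length_code_alt (length : Int) : List (String × Int) :=
  if length < 3 ∨ length > 258 then []   -- Python raises ValueError; excluded by Pre_
  else if length = 258 then [("code", 285), ("extra_bits", 0), ("extra_value", 0)]
  else
    let v := length - 3
    let b := max 0 (pyBitLength v - 3)
    let base_length := (2 ^ (b.toNat + 2) : Int) + 3          -- 1 << (b+2), exact: b ≥ 0
    let base_code := 261 + 4 * b
    -- x >> b and x & ((1<<b)-1) for x ≥ 0 are floordiv / mod by 2^b (exact here)
    [("code", base_code + PySem.Int.floordiv (length - base_length) (2 ^ b.toNat)),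
     ("extra_bits", b),
     ("extra_value", PySem.Int.mod (length - base_length) (2 ^ b.toNat))]

-- ===== PRECONDITION & SPEC =====
-- A raises ValueError outside [3, 258]; exactly those inputs are excluded.
def Pre_get_length_code (length : Int) : Prop := 3 ≤ length ∧ length ≤ 258
instance (length : Int) : Decidable (Pre_get_length_code length) := by unfold Pre_get_length_code; infer_instance
def pvWitness_get_length_code : Int := 42

def Spec_get_length_code (length : Int) (out : List (String × Int)) : Prop := out = get_length_code_alt length
instance (length : Int) (out : List (String × Int)) : Decidable (Spec_get_length_code length out) := by unfold Spec_get_length_code; infer_instance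

-- ===== CLAIM (what is proved, stated in full; the proofs are below) =====
def Claim_equal_get_length_code : Prop := ∀ (length : Int), Dom_get_length_code length → Pre_get_length_code length → Spec_get_length_code length (get_length_code length)

-- ===== LEMMAS AND PROOFS =====

-- ===== VERDICT (by name: the statement is the Claim_ definition above) =====
theorem get_length_code_spec : Claim_equal_get_length_code := by
  intro length _ hpre
  unfold Pre_get_length_code at hpre
  obtain ⟨h1, h2⟩ := hpre
  unfold Spec_get_length_code
  interval_cases length <;> decide
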